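-- pv_equiv track=rewrite | github.com/yatink/aoc23 | christmas_py/day14.py | tilt_column
-- ===== SOURCE A (Python) =====
-- def tilt_column(column: list[str]) -> list[str]:
--     stopping_pt = -1
--     curr = 0
--     while curr < len(column):
--         # If it's a rolling stone
--         if column[curr] == 'O':
--             # Move it
--             column[curr] = '.'
--             column[stopping_pt + 1] = 'O'
--             # Update stopping pt
--             stopping_pt += 1
--         elif column[curr] == '#':
--             # Only update stopping pt
--             stopping_pt = curr
--         curr += 1
--     return column
-- ===== SOURCE B (Python) =====
-- def tilt_column(column: list[str]) -> list[str]: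
--     i = 0
--     n = len(column)
--     while i < n:
--         if column[i] == '#':
--             i += 1
--             continue
--         j = i
--         while j < n and column[j] != '#':
--             j += 1
--         run = column[i:j]
--         k = run.count('O')
--         column[i:j] = ['O'] * k + ['.' if c == 'O' else c for c in run][k:]
--         i = j
--     return column
-- ===== Notes on version B (the rewrite author's own statement) =====
-- stated objective: alternative
-- what changed: Replaces A's single-pass stone-moving simulation with a stopping-point register by a run decomposition: the column is split at '#' barriers and each run is rewritten in place as k 'O's (k = its stone count) followed by its remaining cells with former 'O' positions dotted.
import Mathlib
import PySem

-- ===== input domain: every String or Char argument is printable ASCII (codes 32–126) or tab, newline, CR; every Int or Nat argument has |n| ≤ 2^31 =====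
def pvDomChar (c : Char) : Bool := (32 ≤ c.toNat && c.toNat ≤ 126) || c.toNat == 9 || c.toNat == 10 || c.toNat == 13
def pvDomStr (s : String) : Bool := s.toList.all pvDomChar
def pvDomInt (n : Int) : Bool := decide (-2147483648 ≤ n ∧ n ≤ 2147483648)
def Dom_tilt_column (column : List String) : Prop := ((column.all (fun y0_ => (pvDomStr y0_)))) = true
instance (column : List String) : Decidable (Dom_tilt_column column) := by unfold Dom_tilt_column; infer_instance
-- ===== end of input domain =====

-- B replaces A's single-pass stone-moving simulation (stopping-point register) with a run
-- decomposition at '#' barriers (objective: alternative, same O(n) cost). Both the Python A and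
-- the Python B mutate the argument list in place and return it; the equivalence proved here is
-- about the RETURN value (which is that same list).

-- ===== PORT A =====
-- A's while-loop as recursion on `curr`; the Python item assignments become List.set.
-- In every state reachable from the initial call, 0 ≤ stopping_pt + 1 ≤ curr < len(column),
-- so the index (sp+1).toNat is in range and List.set is exact for `column[stopping_pt+1] = 'O'`.
def tiltLoopA (col : List String) (sp : Int) (curr : Nat) : List String :=
  if _h : curr < col.length then
    if col[curr] = "O" then
      tiltLoopA ((col.set curr ".").set (sp + 1).toNat "O") (sp + 1) (curr + 1)
    else if col[curr] = "#" then
      tiltLoopA col (curr : Int) (curr + 1)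
    else
      tiltLoopA col sp (curr + 1)
  else col
termination_by col.length - curr
decreasing_by all_goals first | (simp [List.length_set]; omega) | omega

def tilt_column (column : List String) : List String := tiltLoopA column (-1) 0

-- ===== PORT B =====
-- Source B: split the column into maximal '#'-free runs; each run of O-count k is rewritten as
-- k 'O's followed by the run with its former 'O' cells dotted (other cells untouched).
def pvDot (c : String) : String := if c = "O" then "." else c

def pvRunOut (run : List String) : List String :=
  List.replicate (run.count "O") "O" ++ (run.map pvDot).drop (run.count "O")

def pvNotHash (s : String) : Bool := s ≠ "#"

def tiltGo : List String → List String
  | [] => []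
  | x :: t =>
    if _h : x = "#" then "#" :: tiltGo t
    else pvRunOut ((x :: t).takeWhile pvNotHash) ++ tiltGo (t.dropWhile pvNotHash)
termination_by l => l.length
decreasing_by
  · simp
  · exact Nat.lt_succ_of_le (List.length_dropWhile_le _ _)

def tilt_column_alt (column : List String) : List String := tiltGo column

-- ===== PRECONDITION & SPEC =====
def Spec_tilt_column (column : List String) (out : List String) : Prop := out = tilt_column_alt column
instance (column : List String) (out : List String) : Decidable (Spec_tilt_column column out) := by unfold Spec_tilt_column; infer_instance

-- ===== CLAIM (what is proved, stated in full; the proofs are below) =====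
def Claim_equal_tilt_column : Prop := ∀ (column : List String), Dom_tilt_column column → Spec_tilt_column column (tilt_column column)

-- ===== LEMMAS AND PROOFS =====

theorem pvNotHash_true {s : String} (h : s ≠ "#") : pvNotHash s = true := by
  simp [pvNotHash, h]

-- takeWhile / dropWhile pass over a prefix on which the predicate holds
theorem tw_app (p : String → Bool) (M L : List String) (h : ∀ x ∈ M, p x = true) :
    (M ++ L).takeWhile p = M ++ L.takeWhile p := by
  induction M with
  | nil => simp
  | cons a t ih =>
    simp only [List.cons_append, List.takeWhile_cons, h a (by simp)]
    simp [ih (fun x hx => h x (by simp [hx]))]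

theorem dw_app (p : String → Bool) (M L : List String) (h : ∀ x ∈ M, p x = true) :
    (M ++ L).dropWhile p = L.dropWhile p := by
  induction M with
  | nil => simp
  | cons a t ih =>
    simp only [List.cons_append, List.dropWhile_cons, h a (by simp)]
    simp [ih (fun x hx => h x (by simp [hx]))]

theorem go_hash (t : List String) : tiltGo ("#" :: t) = "#" :: tiltGo t := by
  rw [tiltGo]; simp

-- one-step unfolding of tiltGo, valid for every list
theorem go_eq (T : List String) :
    tiltGo T = pvRunOut (T.takeWhile pvNotHash) ++ tiltGo (T.dropWhile pvNotHash) := by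
  cases T with
  | nil => simp [tiltGo, pvRunOut]
  | cons x t =>
    by_cases hx : x = "#"
    · subst hx
      rw [List.takeWhile_cons, List.dropWhile_cons]
      have hf : pvNotHash "#" = false := by simp [pvNotHash]
      rw [hf, if_neg (by simp), if_neg (by simp), go_hash]
      simp [pvRunOut]
    · rw [tiltGo]
      simp only [hx, dite_false]
      rw [List.dropWhile_cons, if_pos (pvNotHash_true hx)]

def NoOH (M : List String) : Prop := ∀ x ∈ M, x ≠ "O" ∧ x ≠ "#"

theorem runOut_no (M : List String) (h : NoOH M) : pvRunOut M = M := by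
  have hc : M.count "O" = 0 := by
    rw [List.count_eq_zero]
    intro hmem; exact (h _ hmem).1 rfl
  have hm : M.map pvDot = M := by
    conv_rhs => rw [← List.map_id M]
    exact List.map_congr_left (fun x hx => by simp [pvDot, (h x hx).1])
  simp [pvRunOut, hc, hm]

theorem go_no (M : List String) (h : NoOH M) : tiltGo M = M := by
  rw [go_eq]
  have htw : M.takeWhile pvNotHash = M :=
    List.takeWhile_eq_self_iff.2 (fun x hx => pvNotHash_true (h x hx).2)
  have hdw : M.dropWhile pvNotHash = [] :=
    List.dropWhile_eq_nil_iff.2 (fun x hx => by simp [pvNotHash_true (h x hx).2])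
  rw [htw, hdw, runOut_no M h]
  simp [tiltGo]

theorem go_hash_mid (M T : List String) (h : NoOH M) :
    tiltGo (M ++ "#" :: T) = M ++ "#" :: tiltGo T := by
  rw [go_eq]
  rw [tw_app _ M _ (fun x hx => pvNotHash_true (h x hx).2),
      dw_app _ M _ (fun x hx => pvNotHash_true (h x hx).2)]
  rw [List.takeWhile_cons, List.dropWhile_cons]
  have : pvNotHash "#" = false := by simp [pvNotHash]
  rw [this]
  simp [runOut_no M h, go_hash]

theorem runOut_O_cons (L : List String) :
    pvRunOut ("O" :: L) = "O" :: pvRunOut L := by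
  have : pvDot "O" = "." := by simp [pvDot]
  simp [pvRunOut, this, List.replicate_succ]

theorem go_O_head (T : List String) : tiltGo ("O" :: T) = "O" :: tiltGo T := by
  rw [go_eq ("O" :: T), go_eq T]
  rw [List.takeWhile_cons, List.dropWhile_cons, if_pos (pvNotHash_true (by decide)),
      if_pos (pvNotHash_true (by decide)), runOut_O_cons]
  simp

theorem go_O_mid (m0 : String) (M T : List String) (h : NoOH (m0 :: M)) :
    tiltGo (m0 :: (M ++ "O" :: T)) = "O" :: tiltGo (M ++ "." :: T) := by
  have hM : NoOH M := fun x hx => h x (by simp [hx])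
  have hno : ∀ x ∈ m0 :: M, pvNotHash x = true :=
    fun x hx => pvNotHash_true (h x hx).2
  have hnoM : ∀ x ∈ M, pvNotHash x = true :=
    fun x hx => pvNotHash_true (hM x hx).2
  rw [show m0 :: (M ++ "O" :: T) = (m0 :: M) ++ "O" :: T from rfl, go_eq,
      tw_app _ (m0 :: M) _ hno, dw_app _ (m0 :: M) _ hno, go_eq (T := M ++ "." :: T),
      tw_app _ M _ hnoM, dw_app _ M _ hnoM]
  rw [List.takeWhile_cons, List.dropWhile_cons, List.takeWhile_cons, List.dropWhile_cons,
      if_pos (pvNotHash_true (show "O" ≠ "#" by decide)),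
      if_pos (pvNotHash_true (show "O" ≠ "#" by decide)),
      if_pos (pvNotHash_true (show "." ≠ "#" by decide)),
      if_pos (pvNotHash_true (show "." ≠ "#" by decide))]
  set TW := T.takeWhile pvNotHash with hTW
  have hcM : M.count "O" = 0 := by
    rw [List.count_eq_zero]; intro hmem; exact (hM _ hmem).1 rfl
  have hmapM : M.map pvDot = M := by
    conv_rhs => rw [← List.map_id M]
    exact List.map_congr_left (fun x hx => by simp [pvDot, (hM x hx).1])
  have hm0 : pvDot m0 = m0 := by simp [pvDot, (h m0 (by simp)).1]
  have hcount : ((m0 :: M) ++ "O" :: TW).count "O" = TW.count "O" + 1 := by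
    simp [List.count_append, hcM, (h m0 (by simp)).1]
  have hcount2 : (M ++ "." :: TW).count "O" = TW.count "O" := by
    simp [List.count_append, hcM]
  rw [show (m0 :: M) ++ "O" :: TW = m0 :: (M ++ "O" :: TW) from rfl] at hcount
  rw [pvRunOut, pvRunOut, show (m0 :: M) ++ "O" :: TW = m0 :: (M ++ "O" :: TW) from rfl,
      hcount, hcount2]
  simp only [List.map_cons, List.map_append, hmapM, hm0]
  have hdotO : pvDot "O" = "." := by simp [pvDot]
  have hdotD : pvDot "." = "." := by simp [pvDot]
  rw [hdotO, hdotD, List.replicate_succ]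
  simp only [List.cons_append, List.drop_succ_cons]

-- the loop invariant: all cells in [s, curr) are neither 'O' nor '#'
theorem loop_main (fuel : Nat) : ∀ (col : List String) (s curr : Nat),
    col.length - curr ≤ fuel → s ≤ curr → curr ≤ col.length →
    (∀ j : Nat, (hj : j < col.length) → s ≤ j → j < curr → col[j] ≠ "O" ∧ col[j] ≠ "#") →
    tiltLoopA col ((s : Int) - 1) curr = col.take s ++ tiltGo (col.drop s) := by
  induction fuel with
  | zero =>
    intro col s curr hf hs hc hinv
    have hcl : curr = col.length := by omega
    rw [tiltLoopA]
    simp only [hcl, lt_irrefl, dite_false]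
    have hM : NoOH (col.drop s) := by
      intro x hx
      obtain ⟨i, hi, hix⟩ := List.mem_iff_getElem.1 hx
      rw [List.getElem_drop] at hix
      rw [← hix]
      exact hinv (s + i) (by simp at hi; omega) (by omega) (by simp at hi; omega)
    rw [go_no _ hM, List.take_append_drop]
  | succ n ih =>
    intro col s curr hf hs hc hinv
    by_cases hlt : curr < col.length
    · -- decompose col.drop s = M ++ col[curr] :: T
      have hds : col.drop s = (col.drop s).take (curr - s) ++ col[curr] :: col.drop (curr + 1) := by
        conv_lhs => rw [← List.take_append_drop (curr - s) (col.drop s)]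
        rw [List.drop_drop]
        have he : s + (curr - s) = curr := by omega
        rw [he, List.drop_eq_getElem_cons hlt]
      set M := (col.drop s).take (curr - s) with hMdef
      set T := col.drop (curr + 1) with hTdef
      have hMlen : M.length = curr - s := by
        simp [hMdef]; omega
      have hMno : NoOH M := by
        intro x hx
        obtain ⟨i, hi, hix⟩ := List.mem_iff_getElem.1 hx
        have hi' : i < curr - s := by rw [hMlen] at hi; exact hi
        have : M[i] = col[s + i]'(by omega) := by
          simp only [hMdef]
          rw [List.getElem_take, List.getElem_drop]
        rw [this] at hix
        rw [← hix]
        exact hinv (s + i) (by omega) (by omega) (by omega)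
      have hlen_take : (List.take s col).length = s := by
        rw [List.length_take]; omega
      rw [tiltLoopA]
      simp only [hlt, dite_true]
      by_cases hO : col[curr] = "O"
      · simp only [hO, if_true]
        have hsp : ((s : Int) - 1 + 1) = ((s + 1 : Nat) : Int) - 1 := by push_cast; ring
        have htn : ((s : Int) - 1 + 1).toNat = s := by omega
        set col₂ := ((col.set curr ".").set ((s : Int) - 1 + 1).toNat "O") with hcol₂
        have hcol₂' : col₂ = (col.set curr ".").set s "O" := by rw [hcol₂, htn]
        have hlen₂ : col₂.length = col.length := by simp [hcol₂]
        have hinv₂ : ∀ j : Nat, (hj : j < col₂.length) → s + 1 ≤ j → j < curr + 1 →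
            col₂[j] ≠ "O" ∧ col₂[j] ≠ "#" := by
          intro j hj hsj hjc
          have hj' : j < col.length := by omega
          simp only [hcol₂']
          by_cases hjq : j = curr
          · subst hjq
            rw [List.getElem_set_ne (by omega), List.getElem_set_self (by simp; omega)]
            simp
          · rw [List.getElem_set_ne (by omega), List.getElem_set_ne (by omega)]
            exact hinv j hj' (by omega) (by omega)
        have hIH := ih col₂ (s + 1) (curr + 1) (by omega) (by omega) (by omega) hinv₂
        rw [hsp, hIH]
        have htake2 : List.take s col₂ = List.take s col := by
          simp only [hcol₂', List.take_set]
          have e1 : (List.take s col).set curr "." = List.take s col :=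
            List.set_eq_of_length_le (by rw [hlen_take]; omega)
          rw [e1]
          exact List.set_eq_of_length_le (le_of_eq hlen_take)
        have hgets : col₂[s]'(by omega) = "O" := by
          simp only [hcol₂']
          rw [List.getElem_set_self (by simp; omega)]
        have htake : col₂.take (s + 1) = col.take s ++ ["O"] := by
          rw [List.take_add_one, htake2, List.getElem?_eq_getElem (by omega), hgets]
          rfl
        rw [htake]
        by_cases hcs : curr = s
        · -- M = []
          subst hcs
          have hMnil : M = [] := by
            rw [← List.length_eq_zero_iff, hMlen]; omega
          have hdrop₂ : col₂.drop (curr + 1) = T := by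
            rw [hcol₂', List.set_set, List.drop_set]
            simp only [Nat.lt_succ_self, if_true]
            rw [hTdef]
          rw [hdrop₂, hds, hMnil]
          simp only [List.nil_append]
          rw [hO, go_O_head]
          simp
        · -- M = m0 :: M₁
          have hMne : M ≠ [] := by
            intro hnil; rw [hnil] at hMlen; simp at hMlen; omega
          obtain ⟨m0, M₁, hMc⟩ := List.exists_cons_of_ne_nil hMne
          have hM₁len : M₁.length = curr - s - 1 := by
            rw [hMc] at hMlen; simp at hMlen; omega
          have hdcol : col.drop (s + 1) = M₁ ++ col[curr] :: T := by
            have h1 : col.drop (s + 1) = (col.drop s).drop 1 := by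
              rw [List.drop_drop]
            rw [h1, hds, hMc]; simp
          have hdrop₂ : col₂.drop (s + 1) = M₁ ++ "." :: T := by
            have e1 : col₂.drop (s + 1) = (col.set curr ".").drop (s + 1) := by
              rw [hcol₂', List.drop_set]
              simp
            have e2 : (col.set curr ".").drop (s + 1) =
                (col.drop (s + 1)).set (curr - (s + 1)) "." := by
              rw [List.drop_set, if_neg (by omega)]
            rw [e1, e2, hdcol, List.set_append, if_neg (by rw [hM₁len]; omega)]
            have he : curr - (s + 1) - M₁.length = 0 := by rw [hM₁len]; omega
            rw [he]
            rfl
          rw [hdrop₂, hds, hMc, hO]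
          have hmid := go_O_mid m0 M₁ T (by rw [← hMc]; exact hMno)
          simp only [List.cons_append] at hmid ⊢
          rw [hmid]
          simp
      · simp only [hO, if_false]
        by_cases hH : col[curr] = "#"
        · simp only [hH, if_true]
          have hsp : (curr : Int) = ((curr + 1 : Nat) : Int) - 1 := by push_cast; ring
          rw [hsp, ih col (curr + 1) (curr + 1) (by omega) (by omega) (by omega)
            (by intro j hj h1 h2; omega)]
          have htake : col.take (curr + 1) = col.take s ++ (M ++ ["#"]) := by
            have he : curr + 1 = s + (curr + 1 - s) := by omega
            conv_lhs => rw [he, List.take_add]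
            rw [hds, List.take_append,
                show List.take (curr + 1 - s) M = M from
                  List.take_of_length_le (by rw [hMlen]; omega),
                show curr + 1 - s - M.length = 1 by rw [hMlen]; omega,
                List.take_succ_cons, List.take_zero, hH]
          rw [htake, hds, hH, go_hash_mid M T hMno, hTdef]
          simp
        · simp only [hH, if_false]
          exact ih col s (curr + 1) (by omega) (by omega) (by omega)
            (by intro j hj h1 h2
                by_cases hjq : j = curr
                · subst hjq; exact ⟨hO, hH⟩
                · exact hinv j hj h1 (by omega))
    · rw [tiltLoopA]
      simp only [hlt, dite_false]
      have hM : NoOH (col.drop s) := by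
        intro x hx
        obtain ⟨i, hi, hix⟩ := List.mem_iff_getElem.1 hx
        rw [List.getElem_drop] at hix
        rw [← hix]
        exact hinv (s + i) (by simp at hi; omega) (by omega) (by simp at hi; omega)
      rw [go_no _ hM, List.take_append_drop]

-- ===== VERDICT (by name: the statement is the Claim_ definition above) =====
theorem tilt_column_spec : Claim_equal_tilt_column := by
  intro column _
  unfold Spec_tilt_column tilt_column tilt_column_alt
  have := loop_main column.length column 0 0 (by omega) (by omega) (by omega)
    (by intro j hj h1 h2; omega)
  simpa using this
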